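-- pv_equiv track=rewrite | github.com/mariyajoseph2002/python | acc4.py | calc
-- ===== SOURCE A (Python) =====
-- def calc(arr):
--     sumeve=[]
--     sumodd=[]
--     n=len(arr)
--     for i in range(0,n):
--         if i%2==0:
--             sumeve.append(arr[i])
--         else:
--             sumodd.append(arr[i])
--     sumeve.sort()
--     sumodd.sort()
--     return (sumeve[-2]+sumodd[1])
-- ===== SOURCE B (Python) =====
-- def calc(arr):
--     # One pass: track the two largest even-indexed values and the
--     # two smallest odd-indexed values; no intermediate lists, no sorting.
--     max1 = max2 = None  # largest / second-largest even-indexed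
--     min1 = min2 = None  # smallest / second-smallest odd-indexed
--     for i, x in enumerate(arr):
--         if i % 2 == 0:
--             if max1 is None or x > max1:
--                 max1, max2 = x, max1
--             elif max2 is None or x > max2:
--                 max2 = x
--         else:
--             if min1 is None or x < min1:
--                 min1, min2 = x, min1
--             elif min2 is None or x < min2:
--                 min2 = x
--     return max2 + min2
-- ===== Notes on version B (the rewrite author's own statement) =====
-- stated objective: alternative
-- what changed: Instead of building two index-parity lists and sorting both to index out sorted(evens)[-2] and sorted(odds)[1], B makes a single selection pass that tracks the two largest even-indexed and the two smallest odd-indexed values.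
import Mathlib
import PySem

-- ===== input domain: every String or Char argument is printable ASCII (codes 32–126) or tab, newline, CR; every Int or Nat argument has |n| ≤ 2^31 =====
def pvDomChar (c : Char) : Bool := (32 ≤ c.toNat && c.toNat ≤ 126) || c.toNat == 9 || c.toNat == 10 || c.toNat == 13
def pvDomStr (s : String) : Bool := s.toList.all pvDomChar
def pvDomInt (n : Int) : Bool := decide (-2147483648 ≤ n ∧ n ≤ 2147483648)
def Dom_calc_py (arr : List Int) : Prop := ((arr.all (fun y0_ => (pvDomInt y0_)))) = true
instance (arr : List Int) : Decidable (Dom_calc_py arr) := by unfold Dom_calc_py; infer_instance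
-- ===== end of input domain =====

-- B replaces "split into two lists, sort both, index" by a single pass tracking the two largest
-- even-indexed and the two smallest odd-indexed values (objective: alternative — no sorting, no
-- intermediate lists).

-- ===== PORT A =====
-- arr[i] with i drawn from range(0, len(arr)) is always in range, so pyGetD is exact there;
-- sumeve[-2] / sumodd[1] raise IndexError on short inputs — excluded by Pre_ (pyGetD default unreachable).
def calc_py (arr : List Int) : Int :=
  let st := (PySem.List.pyRange 0 (arr.length : Int) 1).foldl
    (fun (acc : List Int × List Int) i =>
      if PySem.Int.mod i 2 == 0 then (acc.1 ++ [PySem.List.pyGetD arr i 0], acc.2)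
      else (acc.1, acc.2 ++ [PySem.List.pyGetD arr i 0]))
    ([], [])
  let sumeve := PySem.List.sorted st.1 (fun x => x) false
  let sumodd := PySem.List.sorted st.2 (fun x => x) false
  PySem.List.pyGetD sumeve (-2) 0 + PySem.List.pyGetD sumodd 1 0

-- ===== PORT B =====
-- the even-indexed branch of B's loop body: the (max1, max2) update
def pvUpdMax (s : Option Int × Option Int) (x : Int) : Option Int × Option Int :=
  match s with
  | (none, _) => (some x, none)           -- max1, max2 = x, max1 (= None)
  | (some m1, m2) =>
    if x > m1 then (some x, some m1)
    else match m2 with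
      | none => (some m1, some x)
      | some m2v => if x > m2v then (some m1, some x) else (some m1, some m2v)

-- the odd-indexed branch of B's loop body: the (min1, min2) update
def pvUpdMin (s : Option Int × Option Int) (x : Int) : Option Int × Option Int :=
  match s with
  | (none, _) => (some x, none)
  | (some m1, m2) =>
    if x < m1 then (some x, some m1)
    else match m2 with
      | none => (some m1, some x)
      | some m2v => if x < m2v then (some m1, some x) else (some m1, some m2v)

-- max2 + min2 raises TypeError (None operand) on short inputs — excluded by Pre_ (.getD 0 unreachable).
def calc_py_alt (arr : List Int) : Int :=
  let st := (PySem.List.enumerate arr 0).foldl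
    (fun (s : (Option Int × Option Int) × (Option Int × Option Int)) q =>
      if PySem.Int.mod q.1 2 == 0 then (pvUpdMax s.1 q.2, s.2)
      else (s.1, pvUpdMin s.2 q.2))
    ((none, none), (none, none))
  st.1.2.getD 0 + st.2.2.getD 0

-- ===== PRECONDITION & SPEC =====
-- A raises IndexError (and B TypeError) when there are fewer than two even-indexed or fewer
-- than two odd-indexed elements, i.e. exactly when len(arr) < 4.
def Pre_calc_py (arr : List Int) : Prop := 4 ≤ arr.length
instance (arr : List Int) : Decidable (Pre_calc_py arr) := by unfold Pre_calc_py; infer_instance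
def pvWitness_calc_py : List Int := [3, 1, 4, 1, 5, 9]

def Spec_calc_py (arr : List Int) (out : Int) : Prop := out = calc_py_alt arr
instance (arr : List Int) (out : Int) : Decidable (Spec_calc_py arr out) := by unfold Spec_calc_py; infer_instance

-- ===== CLAIM (what is proved, stated in full; the proofs are below) =====
def Claim_equal_calc_py : Prop := ∀ (arr : List Int), Dom_calc_py arr → Pre_calc_py arr → Spec_calc_py arr (calc_py arr)

-- ===== LEMMAS AND PROOFS =====

-- the even-indexed / odd-indexed elements of arr, the common form both ports are reduced to
def pvEvens (arr : List Int) : List Int :=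
  ((PySem.List.enumerate arr 0).filter (fun q => PySem.Int.mod q.1 2 == 0)).map Prod.snd
def pvOdds (arr : List Int) : List Int :=
  ((PySem.List.enumerate arr 0).filter (fun q => !(PySem.Int.mod q.1 2 == 0))).map Prod.snd

lemma pvEnumAppend (xs : List Int) (y : Int) (s : Int) :
    PySem.List.enumerate (xs ++ [y]) s
      = PySem.List.enumerate xs s ++ [((s + xs.length : Int), y)] := by
  induction xs generalizing s with
  | nil => simp [PySem.List.enumerate_cons, PySem.List.enumerate_nil]
  | cons a t ih =>
      simp [PySem.List.enumerate_cons, ih]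
      ring_nf

-- "for i in range(len(arr)): … arr[i] …" filtered on the index is the same data as the
-- filtered enumerate(arr)
lemma pvFiltMap (arr : List Int) (p : Int → Bool) :
    ((PySem.List.pyRange 0 (arr.length : Int) 1).filter p).map (fun i => PySem.List.pyGetD arr i 0)
      = ((PySem.List.enumerate arr 0).filter (fun q => p q.1)).map Prod.snd := by
  induction arr using List.reverseRecOn with
  | nil => simp [PySem.List.pyRange_one_eq_nil, PySem.List.enumerate_nil]
  | append_singleton ys y ih =>
      have hlen : (((ys ++ [y]).length : Nat) : Int) = (ys.length : Int) + 1 := by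
        push_cast [List.length_append, List.length_singleton]; ring
      rw [hlen, PySem.List.pyRange_one_succ_right (by exact_mod_cast Nat.zero_le _),
        List.filter_append, List.map_append, pvEnumAppend, List.filter_append, List.map_append]
      congr 1
      · rw [← ih]
        apply List.map_congr_left
        intro i hi
        have hmem := List.mem_of_mem_filter hi
        have hrange := (PySem.List.mem_pyRange_one).mp hmem
        have hub : i < (((ys ++ [y]).length : Nat) : Int) := by
          simp only [List.length_append, List.length_singleton]
          push_cast; omega
        rw [PySem.List.pyGetD_eq_getElem (ys ++ [y]) 0 hrange.1 hub,
            PySem.List.pyGetD_eq_getElem ys 0 hrange.1 (by exact_mod_cast hrange.2)]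
        have hlt : i.toNat < ys.length := by omega
        exact List.getElem_append_left (bs := [y]) hlt
      · by_cases hpy : p (ys.length : Int) <;>
          simp [hpy, PySem.List.pyGetD_natCast]

lemma pvA_reduced (arr : List Int) :
    calc_py arr
      = PySem.List.pyGetD (PySem.List.sorted (pvEvens arr) (fun x => x) false) (-2) 0
        + PySem.List.pyGetD (PySem.List.sorted (pvOdds arr) (fun x => x) false) 1 0 := by
  have hfun : (fun (acc : List Int × List Int) (i : Int) =>
        if PySem.Int.mod i 2 == 0 then (acc.1 ++ [PySem.List.pyGetD arr i 0], acc.2)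
        else (acc.1, acc.2 ++ [PySem.List.pyGetD arr i 0]))
      = (fun (acc : List Int × List Int) (i : Int) =>
          ((fun (a : List Int) (i : Int) =>
              if PySem.Int.mod i 2 == 0 then a ++ [PySem.List.pyGetD arr i 0] else a) acc.1 i,
           (fun (a : List Int) (i : Int) =>
              if !(PySem.Int.mod i 2 == 0) then a ++ [PySem.List.pyGetD arr i 0] else a) acc.2 i)) := by
    funext acc i
    cases h : (PySem.Int.mod i 2 == 0) <;> simp only [h] <;> simp
  simp only [calc_py]
  rw [hfun, PySem.List.foldl_prod_mk
        (f := fun (a : List Int) (i : Int) =>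
          if PySem.Int.mod i 2 == 0 then a ++ [PySem.List.pyGetD arr i 0] else a)
        (g := fun (a : List Int) (i : Int) =>
          if !(PySem.Int.mod i 2 == 0) then a ++ [PySem.List.pyGetD arr i 0] else a),
    PySem.List.foldl_append_if, PySem.List.foldl_append_if,
    List.nil_append, List.nil_append, pvFiltMap arr _, pvFiltMap arr _]
  rfl

lemma pvB_reduced (arr : List Int) :
    calc_py_alt arr
      = ((pvEvens arr).foldl pvUpdMax (none, none)).2.getD 0
        + ((pvOdds arr).foldl pvUpdMin (none, none)).2.getD 0 := by
  have hfun : (fun (s : (Option Int × Option Int) × (Option Int × Option Int)) (q : Int × Int) =>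
        if PySem.Int.mod q.1 2 == 0 then (pvUpdMax s.1 q.2, s.2)
        else (s.1, pvUpdMin s.2 q.2))
      = (fun (s : (Option Int × Option Int) × (Option Int × Option Int)) (q : Int × Int) =>
          ((fun (m : Option Int × Option Int) (q : Int × Int) =>
              if PySem.Int.mod q.1 2 == 0 then pvUpdMax m q.2 else m) s.1 q,
           (fun (m : Option Int × Option Int) (q : Int × Int) =>
              if !(PySem.Int.mod q.1 2 == 0) then pvUpdMin m q.2 else m) s.2 q)) := by
    funext s q
    cases h : (PySem.Int.mod q.1 2 == 0) <;> simp only [h] <;> simp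
  simp only [calc_py_alt]
  rw [hfun, PySem.List.foldl_prod_mk
        (f := fun (m : Option Int × Option Int) (q : Int × Int) =>
          if PySem.Int.mod q.1 2 == 0 then pvUpdMax m q.2 else m)
        (g := fun (m : Option Int × Option Int) (q : Int × Int) =>
          if !(PySem.Int.mod q.1 2 == 0) then pvUpdMin m q.2 else m),
    PySem.List.foldl_if_eq_foldl_filter, PySem.List.foldl_if_eq_foldl_filter]
  have hmapMax : ∀ (lf : List (Int × Int)),
      List.foldl (fun (m : Option Int × Option Int) (q : Int × Int) => pvUpdMax m q.2) (none, none) lf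
        = List.foldl pvUpdMax (none, none) (lf.map Prod.snd) := by
    intro lf; rw [List.foldl_map]
  have hmapMin : ∀ (lf : List (Int × Int)),
      List.foldl (fun (m : Option Int × Option Int) (q : Int × Int) => pvUpdMin m q.2) (none, none) lf
        = List.foldl pvUpdMin (none, none) (lf.map Prod.snd) := by
    intro lf; rw [List.foldl_map]
  rw [hmapMax, hmapMin]
  rfl

def pvInvMax (p : List Int) (s : Option Int × Option Int) : Prop :=
  (p = [] ∧ s = (none, none)) ∨
  (∃ a, p = [a] ∧ s = (some a, none)) ∨
  (∃ a b rest, p.Perm (a :: b :: rest) ∧ s = (some a, some b) ∧ b ≤ a ∧ ∀ y ∈ rest, y ≤ b)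

def pvInvMin (p : List Int) (s : Option Int × Option Int) : Prop :=
  (p = [] ∧ s = (none, none)) ∨
  (∃ a, p = [a] ∧ s = (some a, none)) ∨
  (∃ a b rest, p.Perm (a :: b :: rest) ∧ s = (some a, some b) ∧ a ≤ b ∧ ∀ y ∈ rest, b ≤ y)

lemma pvInvMax_step (p : List Int) (s : Option Int × Option Int) (x : Int)
    (h : pvInvMax p s) : pvInvMax (p ++ [x]) (pvUpdMax s x) := by
  rcases h with ⟨hp, hs⟩ | ⟨a, hp, hs⟩ | ⟨a, b, rest, hp, hs, hba, hr⟩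
  · subst hs hp
    exact Or.inr (Or.inl ⟨x, rfl, rfl⟩)
  · subst hs hp
    right; right
    by_cases h1 : x > a
    · exact ⟨x, a, [], List.Perm.swap x a [], by simp [pvUpdMax, h1], le_of_lt h1, by simp⟩
    · exact ⟨a, x, [], List.Perm.refl _, by simp [pvUpdMax, h1], le_of_not_gt h1, by simp⟩
  · subst hs
    right; right
    have hbase : (p ++ [x]).Perm (x :: a :: b :: rest) :=
      (hp.append_right [x]).trans (List.perm_append_singleton x (a :: b :: rest))
    by_cases h1 : x > a
    · refine ⟨x, a, b :: rest, hbase, by simp [pvUpdMax, h1], le_of_lt h1, ?_⟩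
      intro y hy
      rcases List.mem_cons.mp hy with rfl | hy
      · exact hba
      · exact (hr y hy).trans hba
    · by_cases h2 : x > b
      · refine ⟨a, x, b :: rest, hbase.trans (List.Perm.swap a x (b :: rest)),
          by simp [pvUpdMax, h1, h2], le_of_not_gt h1, ?_⟩
        intro y hy
        rcases List.mem_cons.mp hy with rfl | hy
        · exact le_of_lt h2
        · exact (hr y hy).trans (le_of_lt h2)
      · refine ⟨a, b, x :: rest,
          hbase.trans ((List.Perm.swap a x (b :: rest)).trans ((List.Perm.swap b x rest).cons a)),
          by simp [pvUpdMax, h1, h2], hba, ?_⟩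
        intro y hy
        rcases List.mem_cons.mp hy with rfl | hy
        · exact le_of_not_gt h2
        · exact hr y hy

lemma pvInvMin_step (p : List Int) (s : Option Int × Option Int) (x : Int)
    (h : pvInvMin p s) : pvInvMin (p ++ [x]) (pvUpdMin s x) := by
  rcases h with ⟨hp, hs⟩ | ⟨a, hp, hs⟩ | ⟨a, b, rest, hp, hs, hab, hr⟩
  · subst hs hp
    exact Or.inr (Or.inl ⟨x, rfl, rfl⟩)
  · subst hs hp
    right; right
    by_cases h1 : x < a
    · exact ⟨x, a, [], List.Perm.swap x a [], by simp [pvUpdMin, h1], le_of_lt h1, by simp⟩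
    · exact ⟨a, x, [], List.Perm.refl _, by simp [pvUpdMin, h1], le_of_not_gt h1, by simp⟩
  · subst hs
    right; right
    have hbase : (p ++ [x]).Perm (x :: a :: b :: rest) :=
      (hp.append_right [x]).trans (List.perm_append_singleton x (a :: b :: rest))
    by_cases h1 : x < a
    · refine ⟨x, a, b :: rest, hbase, by simp [pvUpdMin, h1], le_of_lt h1, ?_⟩
      intro y hy
      rcases List.mem_cons.mp hy with rfl | hy
      · exact hab
      · exact hab.trans (hr y hy)
    · by_cases h2 : x < b
      · refine ⟨a, x, b :: rest, hbase.trans (List.Perm.swap a x (b :: rest)),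
          by simp [pvUpdMin, h1, h2], le_of_not_gt h1, ?_⟩
        intro y hy
        rcases List.mem_cons.mp hy with rfl | hy
        · exact le_of_lt h2
        · exact (le_of_lt h2).trans (hr y hy)
      · refine ⟨a, b, x :: rest,
          hbase.trans ((List.Perm.swap a x (b :: rest)).trans ((List.Perm.swap b x rest).cons a)),
          by simp [pvUpdMin, h1, h2], hab, ?_⟩
        intro y hy
        rcases List.mem_cons.mp hy with rfl | hy
        · exact le_of_not_gt h2
        · exact hr y hy

lemma pvInvMax_foldl (l : List Int) : ∀ (p : List Int) (s : Option Int × Option Int),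
    pvInvMax p s → pvInvMax (p ++ l) (l.foldl pvUpdMax s) := by
  induction l with
  | nil => intro p s h; simpa using h
  | cons x t ih =>
      intro p s h
      have := ih (p ++ [x]) (pvUpdMax s x) (pvInvMax_step p s x h)
      simpa [List.append_assoc] using this

lemma pvInvMin_foldl (l : List Int) : ∀ (p : List Int) (s : Option Int × Option Int),
    pvInvMin p s → pvInvMin (p ++ l) (l.foldl pvUpdMin s) := by
  induction l with
  | nil => intro p s h; simpa using h
  | cons x t ih =>
      intro p s h
      have := ih (p ++ [x]) (pvUpdMin s x) (pvInvMin_step p s x h)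
      simpa [List.append_assoc] using this

-- sorted(l)[-2] is the second-largest element (with multiplicity)
lemma pvSortedSecondMax (l : List Int) (a b : Int) (rest : List Int)
    (hp : l.Perm (a :: b :: rest)) (hba : b ≤ a) (hr : ∀ y ∈ rest, y ≤ b) :
    PySem.List.pyGetD (PySem.List.sorted l (fun x => x) false) (-2) 0 = b := by
  have hs : PySem.List.sorted l (fun x => x) false
      = PySem.List.sorted rest (fun x => x) false ++ [b, a] := by
    apply PySem.List.sorted_id_eq_of_perm_of_pairwise
    · have h1 : (PySem.List.sorted rest (fun x => x) false ++ [b, a]).Perm (rest ++ [b, a]) :=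
        (PySem.List.sorted_perm rest (fun x => x) false).append_right _
      have h2 : (rest ++ [b, a]).Perm (a :: b :: rest) :=
        (List.perm_append_comm).trans (List.Perm.swap a b rest)
      exact (h1.trans h2).trans hp.symm
    · refine List.pairwise_append.mpr ⟨PySem.List.sorted_pairwise rest (fun x => x), ?_, ?_⟩
      · simp [hba]
      · intro u hu v hv
        have hu' : u ∈ rest := (PySem.List.mem_sorted rest (fun x => x) false u).mp hu
        have hub : u ≤ b := hr u hu'
        rcases List.mem_cons.mp hv with rfl | hv
        · exact hub
        · simp at hv; subst hv; exact hub.trans hba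
  rw [hs]
  set t := PySem.List.sorted rest (fun x => x) false with ht
  have hlen : (t ++ [b, a]).length = t.length + 2 := by simp
  rw [PySem.List.pyGetD_neg_ofNat (t ++ [b, a]) 2 0 (by omega) (by omega)]
  simp [hlen]

-- sorted(l)[1] is the second-smallest element (with multiplicity)
lemma pvSortedSecondMin (l : List Int) (a b : Int) (rest : List Int)
    (hp : l.Perm (a :: b :: rest)) (hab : a ≤ b) (hr : ∀ y ∈ rest, b ≤ y) :
    PySem.List.pyGetD (PySem.List.sorted l (fun x => x) false) 1 0 = b := by
  have hs : PySem.List.sorted l (fun x => x) false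
      = a :: b :: PySem.List.sorted rest (fun x => x) false := by
    apply PySem.List.sorted_id_eq_of_perm_of_pairwise
    · exact (((PySem.List.sorted_perm rest (fun x => x) false).cons b).cons a).trans hp.symm
    · refine List.pairwise_cons.mpr ⟨?_, List.pairwise_cons.mpr ⟨?_, PySem.List.sorted_pairwise rest (fun x => x)⟩⟩
      · intro y hy
        rcases List.mem_cons.mp hy with rfl | hy
        · exact hab
        · exact hab.trans (hr y ((PySem.List.mem_sorted rest (fun x => x) false y).mp hy))
      · intro y hy
        exact hr y ((PySem.List.mem_sorted rest (fun x => x) false y).mp hy)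
  rw [hs]
  simp [pysem]

-- ===== VERDICT (by name: the statement is the Claim_ definition above) =====
theorem calc_py_spec : Claim_equal_calc_py := by
  intro arr _ hpre
  unfold Spec_calc_py
  rw [pvA_reduced, pvB_reduced]
  obtain ⟨x0, x1, x2, x3, t, rfl⟩ :
      ∃ x0 x1 x2 x3 t, arr = x0 :: x1 :: x2 :: x3 :: t := by
    match arr, hpre with
    | x0 :: x1 :: x2 :: x3 :: t, _ => exact ⟨x0, x1, x2, x3, t, rfl⟩
  set arr := x0 :: x1 :: x2 :: x3 :: t with harr
  have hE : ∃ tE, pvEvens arr = x0 :: x2 :: tE := by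
    refine ⟨((PySem.List.enumerate t 4).filter (fun q => PySem.Int.mod q.1 2 == 0)).map Prod.snd, ?_⟩
    simp [pvEvens, harr, PySem.List.enumerate_cons]
  have hO : ∃ tO, pvOdds arr = x1 :: x3 :: tO := by
    refine ⟨((PySem.List.enumerate t 4).filter (fun q => !(PySem.Int.mod q.1 2 == 0))).map Prod.snd, ?_⟩
    simp [pvOdds, harr, PySem.List.enumerate_cons]
  obtain ⟨tE, hE⟩ := hE
  obtain ⟨tO, hO⟩ := hO
  have hinvE := pvInvMax_foldl (pvEvens arr) [] (none, none) (Or.inl ⟨rfl, rfl⟩)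
  have hinvO := pvInvMin_foldl (pvOdds arr) [] (none, none) (Or.inl ⟨rfl, rfl⟩)
  rw [List.nil_append] at hinvE hinvO
  rcases hinvE with ⟨hnil, _⟩ | ⟨a, hone, _⟩ | ⟨a, b, rest, hperm, hsE, hba, hrE⟩
  · rw [hE] at hnil; exact absurd hnil (by simp)
  · rw [hE] at hone; exact absurd hone (by simp)
  rcases hinvO with ⟨hnil, _⟩ | ⟨c, hone, _⟩ | ⟨c, d, restO, hpermO, hsO, hcd, hrO⟩
  · rw [hO] at hnil; exact absurd hnil (by simp)
  · rw [hO] at hone; exact absurd hone (by simp)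
  rw [hsE, hsO, pvSortedSecondMax (pvEvens arr) a b rest hperm hba hrE,
    pvSortedSecondMin (pvOdds arr) c d restO hpermO hcd hrO]
  rfl
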